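-- pv_equiv track=rewrite | github.com/roleyguacamole/AdventOfCode | Y2015 D05.py | processLine2
-- ===== SOURCE A (Python) =====
-- def processLine2(inputLine):
--     hasTwoDouble = False
--     hasPalindrome = False
--     doubles = {}
--     for i in range(len(inputLine)):
--         if i < len(inputLine) - 2:
--             if inputLine[i] == inputLine[i+2]:
--                 hasPalindrome = True
--         if i < len(inputLine) - 1:
--             if inputLine[i] + inputLine[i+1] in doubles:
--                 if doubles[inputLine[i] + inputLine[i+1]] < i - 1:
--                     hasTwoDouble = True
--             else:
--                 doubles[inputLine[i] + inputLine[i+1]] = i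
--
--     if hasTwoDouble and hasPalindrome:
--         return True
--     else:
--         return False
-- ===== SOURCE B (Python) =====
-- def processLine2(inputLine):
--     hasTwoDouble = any(inputLine[i:i+2] in inputLine[i+2:] for i in range(len(inputLine) - 1))
--     hasPalindrome = any(inputLine[i] == inputLine[i+2] for i in range(len(inputLine) - 2))
--     return hasTwoDouble and hasPalindrome
-- ===== Notes on version B (the rewrite author's own statement) =====
-- stated objective: simpler
-- what changed: Replaced the single indexed pass that maintains a first-occurrence dict of pairs and mutable flags with two direct any(...) generator expressions: a substring search s[i:i+2] in s[i+2:] for the non-overlapping repeated pair and a direct s[i]==s[i+2] scan for the sandwich.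
import Mathlib
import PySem

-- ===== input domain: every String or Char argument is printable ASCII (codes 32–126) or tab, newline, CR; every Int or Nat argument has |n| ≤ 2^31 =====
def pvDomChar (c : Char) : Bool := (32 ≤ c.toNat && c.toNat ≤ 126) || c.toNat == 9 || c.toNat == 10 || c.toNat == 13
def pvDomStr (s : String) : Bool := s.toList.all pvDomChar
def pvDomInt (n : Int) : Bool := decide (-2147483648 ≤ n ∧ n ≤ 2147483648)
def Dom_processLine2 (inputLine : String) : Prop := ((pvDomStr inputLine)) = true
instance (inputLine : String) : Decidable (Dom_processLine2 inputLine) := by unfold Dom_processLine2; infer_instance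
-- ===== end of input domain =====

-- B replaces A's single pass with a maintained first-occurrence dict of pairs by two direct
-- any(...) scans (substring search for the repeated pair, index scan for the sandwich): simpler, not faster.


-- ===== PORT A =====
-- one step of A's loop body; indexing is in range exactly where the guards hold, so getD is exact
def pvStepA (cs : List Char) (n : Nat) (st : Bool × Bool × PySem.Dict (List Char) Int) (i : Nat) :
    Bool × Bool × PySem.Dict (List Char) Int :=
  let hasTwo := st.1
  let hasPal := st.2.1
  let doubles := st.2.2
  let hasPal := if (i : Int) < (n : Int) - 2 then
      (if cs.getD i ' ' = cs.getD (i+2) ' ' then true else hasPal) else hasPal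
  if (i : Int) < (n : Int) - 1 then
    let key := [cs.getD i ' ', cs.getD (i+1) ' ']
    match doubles.get? key with
    | some v => (if v < (i : Int) - 1 then true else hasTwo, hasPal, doubles)
    | none => (hasTwo, hasPal, doubles.insert key (i : Int))
  else (hasTwo, hasPal, doubles)

def processLine2 (inputLine : String) : Bool :=
  let cs := inputLine.toList
  let n := cs.length
  let r := (List.range n).foldl (pvStepA cs n) (false, false, PySem.Dict.empty)
  if r.1 && r.2.1 then true else false

-- ===== PORT B =====
def processLine2_alt (inputLine : String) : Bool :=
  let cs := inputLine.toList
  let hasTwoDouble := (List.range (cs.length - 1)).any (fun i =>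
      PySem.Chars.isIn (PySem.List.slice cs (some (i : Int)) (some ((i : Int) + 2))) (cs.drop (i + 2)))
  let hasPalindrome := (List.range (cs.length - 2)).any (fun i =>
      cs.getD i ' ' == cs.getD (i+2) ' ')
  hasTwoDouble && hasPalindrome

-- ===== PRECONDITION & SPEC =====
def Spec_processLine2 (inputLine : String) (out : Bool) : Prop := out = processLine2_alt inputLine
instance (inputLine : String) (out : Bool) : Decidable (Spec_processLine2 inputLine out) := by unfold Spec_processLine2; infer_instance

-- ===== CLAIM (what is proved, stated in full; the proofs are below) =====
def Claim_equal_processLine2 : Prop := ∀ (inputLine : String), Dom_processLine2 inputLine → Spec_processLine2 inputLine (processLine2 inputLine)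

-- ===== LEMMAS AND PROOFS =====

-- the pair "inputLine[i] + inputLine[i+1]" as a key
def pvKey (cs : List Char) (i : Nat) : List Char := [cs.getD i ' ', cs.getD (i+1) ' ']

-- A's dict predicate: index i is a (guarded) occurrence of key k
def pvPred (cs : List Char) (n : Nat) (k : List Char) (i : Nat) : Bool :=
  decide (i + 1 < n) && (pvKey cs i == k)

def pvCast (o : Option Nat) : Option Int :=
  match o with
  | none => none
  | some i => some (i : Int)

-- the two existentials the loop state tracks after m iterations
def pvTwoEx (cs : List Char) (n m : Nat) : Prop :=
  ∃ i j : Nat, i + 2 ≤ j ∧ j < m ∧ j + 1 < n ∧ pvKey cs i = pvKey cs j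

def pvPalEx (cs : List Char) (n m : Nat) : Prop :=
  ∃ i : Nat, i < m ∧ i + 2 < n ∧ cs.getD i ' ' = cs.getD (i+2) ' '

theorem pvKey_def (cs : List Char) (i : Nat) :
    pvKey cs i = [cs.getD i ' ', cs.getD (i+1) ' '] := rfl

-- first-occurrence characterisation of find? over a range
theorem pvFindRange (p : Nat → Bool) (m v : Nat) :
    (List.range m).find? p = some v ↔ v < m ∧ p v = true ∧ ∀ j < v, p j = false := by
  rw [List.find?_eq_some_iff_getElem]
  constructor
  · rintro ⟨hp, i, hi, hiv, hmin⟩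
    rw [List.getElem_range] at hiv
    subst hiv
    rw [List.length_range] at hi
    refine ⟨hi, hp, fun j hj => ?_⟩
    have := hmin j hj
    rwa [List.getElem_range, Bool.not_eq_true'] at this
  · rintro ⟨hv, hp, hmin⟩
    refine ⟨hp, v, by simpa using hv, by simp, fun j hj => ?_⟩
    rw [List.getElem_range, Bool.not_eq_true']
    exact hmin j hj

-- main invariant of A's loop
theorem pvInv (cs : List Char) (n : Nat) :
    ∀ m, ∃ (b p : Bool) (d : PySem.Dict (List Char) Int),
      (List.range m).foldl (pvStepA cs n) (false, false, PySem.Dict.empty) = (b, p, d) ∧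
      (b = true ↔ pvTwoEx cs n m) ∧
      (p = true ↔ pvPalEx cs n m) ∧
      ∀ k, d.get? k = pvCast ((List.range m).find? (pvPred cs n k)) := by
  intro m
  induction m with
  | zero =>
    refine ⟨false, false, PySem.Dict.empty, by simp, ?_, ?_,
      fun k => by simp [pvCast, PySem.Dict.get?_empty]⟩
    · constructor
      · intro h; exact absurd h Bool.false_ne_true
      · rintro ⟨i, j, -, hj, -⟩; omega
    · constructor
      · intro h; exact absurd h Bool.false_ne_true
      · rintro ⟨i, hi, -⟩; omega
  | succ m ih =>
    obtain ⟨b, p, d, hf, hb, hp, hg⟩ := ih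
    rw [List.range_succ, List.foldl_append, List.foldl_cons, List.foldl_nil, hf]
    have hpal : ∀ q : Bool, (q = true ↔ pvPalEx cs n m) →
        (((if (m : Int) < (n : Int) - 2 then
          (if cs.getD m ' ' = cs.getD (m+2) ' ' then true else q) else q) = true)
          ↔ pvPalEx cs n (m+1)) := by
      intro q hq
      split_ifs with hg2 he
      · exact iff_of_true rfl ⟨m, by omega, by omega, he⟩
      · rw [hq]
        constructor
        · rintro ⟨i, hi, h2, h3⟩; exact ⟨i, by omega, h2, h3⟩
        · rintro ⟨i, hi, h2, h3⟩
          rcases Nat.lt_succ_iff_lt_or_eq.mp hi with hi' | rfl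
          · exact ⟨i, hi', h2, h3⟩
          · exact absurd h3 he
      · rw [hq]
        constructor
        · rintro ⟨i, hi, h2, h3⟩; exact ⟨i, by omega, h2, h3⟩
        · rintro ⟨i, hi, h2, h3⟩
          rcases Nat.lt_succ_iff_lt_or_eq.mp hi with hi' | rfl
          · exact ⟨i, hi', h2, h3⟩
          · omega
    by_cases hg1 : (m : Int) < (n : Int) - 1
    · -- the pair at m exists: the loop consults / extends the dict
      have hmn : m + 1 < n := by omega
      cases hdk : d.get? (pvKey cs m) with
      | none =>
        have hnone : (List.range m).find? (pvPred cs n (pvKey cs m)) = none := by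
          have h := hg (pvKey cs m); rw [hdk] at h
          cases h0 : (List.range m).find? (pvPred cs n (pvKey cs m)) with
          | none => rfl
          | some w => rw [h0] at h; exact absurd h.symm (by simp [pvCast])
        have hnone' := List.find?_eq_none.mp hnone
        simp only [pvStepA]
        rw [if_pos hg1]
        simp only [← pvKey_def]
        simp only [hdk]
        refine ⟨b, _, _, rfl, ?_, hpal p hp, ?_⟩
        · rw [hb]
          constructor
          · rintro ⟨i, j, h1, h2, h3, h4⟩; exact ⟨i, j, h1, by omega, h3, h4⟩
          · rintro ⟨i, j, h1, h2, h3, h4⟩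
            rcases Nat.lt_succ_iff_lt_or_eq.mp h2 with h2' | rfl
            · exact ⟨i, j, h1, h2', h3, h4⟩
            · exfalso
              have hmem : i ∈ List.range j := List.mem_range.mpr (by omega)
              have h5 := hnone' i hmem
              rw [pvPred, Bool.and_eq_true, decide_eq_true_iff, beq_iff_eq] at h5
              rw [not_and] at h5
              exact absurd h4 (h5 (by omega))
        · intro k
          rw [List.find?_append]
          by_cases hk : k = pvKey cs m
          · subst hk
            rw [PySem.Dict.get?_insert_self, hnone]
            have hpm : pvPred cs n (pvKey cs m) m = true := by
              simp [pvPred, hmn]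
            simp [List.find?, hpm, pvCast]
          · rw [PySem.Dict.get?_insert, if_neg hk]
            have hpm : pvPred cs n k m = false := by
              simp [pvPred, hmn, Ne.symm hk]
            cases h0 : (List.range m).find? (pvPred cs n k) with
            | none =>
              have h := hg k; rw [h0] at h
              simp [h, List.find?, hpm, pvCast]
            | some w =>
              have h := hg k; rw [h0] at h
              simp [h, pvCast]
      | some v =>
        obtain ⟨v', hfind, rfl⟩ :
            ∃ v' : Nat, (List.range m).find? (pvPred cs n (pvKey cs m)) = some v' ∧ v = (v' : Int) := by
          have h := hg (pvKey cs m); rw [hdk] at h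
          cases h0 : (List.range m).find? (pvPred cs n (pvKey cs m)) with
          | none => rw [h0] at h; exact absurd h (by simp [pvCast])
          | some w =>
            rw [h0] at h
            simp only [pvCast] at h
            exact ⟨w, rfl, by injection h⟩
        obtain ⟨hvm, hpv, hmin⟩ := (pvFindRange _ m v').mp hfind
        rw [pvPred, Bool.and_eq_true, decide_eq_true_iff, beq_iff_eq] at hpv
        obtain ⟨hv1, hveq⟩ := hpv
        simp only [pvStepA]
        rw [if_pos hg1]
        simp only [← pvKey_def]
        simp only [hdk]
        refine ⟨_, _, d, rfl, ?_, hpal p hp, ?_⟩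
        · by_cases hvlt : v' + 2 ≤ m
          · rw [if_pos (show (v' : Int) < (m : Int) - 1 by omega)]
            exact iff_of_true rfl ⟨v', m, hvlt, by omega, hmn, hveq⟩
          · rw [if_neg (show ¬ (v' : Int) < (m : Int) - 1 by omega), hb]
            constructor
            · rintro ⟨i, j, h1, h2, h3, h4⟩; exact ⟨i, j, h1, by omega, h3, h4⟩
            · rintro ⟨i, j, h1, h2, h3, h4⟩
              rcases Nat.lt_succ_iff_lt_or_eq.mp h2 with h2' | rfl
              · exact ⟨i, j, h1, h2', h3, h4⟩
              · exfalso
                have hpi : pvPred cs n (pvKey cs j) i = true := by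
                  rw [pvPred, Bool.and_eq_true, decide_eq_true_iff, beq_iff_eq]
                  exact ⟨by omega, h4⟩
                have : ¬ i < v' := fun hlt => by
                  rw [hmin i hlt] at hpi; exact Bool.false_ne_true hpi
                omega
        · intro k
          rw [List.find?_append]
          cases h0 : (List.range m).find? (pvPred cs n k) with
          | some w =>
            have h := hg k; rw [h0] at h
            simp [h, pvCast]
          | none =>
            have hk : k ≠ pvKey cs m := by
              rintro rfl; rw [h0] at hfind; simp at hfind
            have hpm : pvPred cs n k m = false := by
              simp [pvPred, hmn, Ne.symm hk]
            have h := hg k; rw [h0] at h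
            simp [h, List.find?, hpm, pvCast]
    · -- no pair at m: the whole double branch is skipped
      have hmn : ¬ m + 1 < n := by omega
      simp only [pvStepA]
      rw [if_neg hg1]
      refine ⟨b, _, d, rfl, ?_, hpal p hp, ?_⟩
      · rw [hb]
        constructor
        · rintro ⟨i, j, h1, h2, h3, h4⟩; exact ⟨i, j, h1, by omega, h3, h4⟩
        · rintro ⟨i, j, h1, h2, h3, h4⟩
          rcases Nat.lt_succ_iff_lt_or_eq.mp h2 with h2' | rfl
          · exact ⟨i, j, h1, h2', h3, h4⟩
          · omega
      · intro k
        rw [List.find?_append]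
        have hpm : pvPred cs n k m = false := by
          simp [pvPred, hmn]
        cases h0 : (List.range m).find? (pvPred cs n k) with
        | none =>
          have h := hg k; rw [h0] at h
          simp [h, List.find?, hpm, pvCast]
        | some w =>
          have h := hg k; rw [h0] at h
          simp [h, pvCast]

-- [a, b] is a prefix of cs.drop t iff cs has exactly those two characters at t, t+1
theorem pvPairPrefix (cs : List Char) (a b : Char) (t : Nat) :
    ([a, b] <+: cs.drop t) ↔ (t + 1 < cs.length ∧ cs.getD t ' ' = a ∧ cs.getD (t+1) ' ' = b) := by
  constructor
  · intro h
    have hlen : 2 ≤ (cs.drop t).length := by simpa using h.length_le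
    rw [List.length_drop] at hlen
    have ht : t < cs.length := by omega
    have ht1 : t + 1 < cs.length := by omega
    rw [List.drop_eq_getElem_cons ht, List.drop_eq_getElem_cons ht1] at h
    obtain ⟨ha, h2⟩ := List.cons_prefix_cons.mp h
    obtain ⟨hb, -⟩ := List.cons_prefix_cons.mp h2
    exact ⟨ht1, by rw [List.getD_eq_getElem _ _ ht]; exact ha.symm,
      by rw [List.getD_eq_getElem _ _ ht1]; exact hb.symm⟩
  · rintro ⟨ht1, ha, hb⟩
    have ht : t < cs.length := by omega
    rw [List.drop_eq_getElem_cons ht, List.drop_eq_getElem_cons ht1]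
    rw [List.getD_eq_getElem _ _ ht] at ha
    rw [List.getD_eq_getElem _ _ ht1] at hb
    exact List.cons_prefix_cons.mpr ⟨ha.symm, List.cons_prefix_cons.mpr ⟨hb.symm, List.nil_prefix⟩⟩

-- the slice inputLine[i:i+2], for i < len - 1
theorem pvSliceTwo (cs : List Char) (i : Nat) (hi : i + 1 < cs.length) :
    PySem.List.slice cs (some (i : Int)) (some ((i : Int) + 2)) = [cs.getD i ' ', cs.getD (i+1) ' '] := by
  have h2 : PySem.List.slice cs (some (i : Int)) (some ((i : Int) + 2)) = (cs.drop i).take 2 := by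
    have := PySem.List.slice_natCast_add cs i 2
    simpa using this
  rw [h2, List.drop_eq_getElem_cons (show i < cs.length by omega), List.drop_eq_getElem_cons hi]
  rw [List.getD_eq_getElem _ _ (show i < cs.length by omega), List.getD_eq_getElem _ _ hi]
  rfl

theorem pvB_two_iff (cs : List Char) :
    ((List.range (cs.length - 1)).any (fun i =>
        PySem.Chars.isIn (PySem.List.slice cs (some (i : Int)) (some ((i : Int) + 2))) (cs.drop (i + 2)))) = true
      ↔ pvTwoEx cs cs.length cs.length := by
  rw [List.any_eq_true]
  constructor
  · rintro ⟨i, hi, hIn⟩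
    rw [List.mem_range] at hi
    have hi1 : i + 1 < cs.length := by omega
    rw [pvSliceTwo cs i hi1] at hIn
    obtain ⟨j, hpre⟩ := (PySem.Chars.exists_prefix_drop_iff_isIn _ _).mpr hIn
    rw [List.drop_drop] at hpre
    obtain ⟨hlt, ha, hb⟩ := (pvPairPrefix cs _ _ _).mp hpre
    refine ⟨i, i + 2 + j, by omega, by omega, by omega, ?_⟩
    rw [pvKey, pvKey, ha, hb]
  · rintro ⟨i, t, h1, h2, h3, h4⟩
    have hi1 : i + 1 < cs.length := by omega
    refine ⟨i, List.mem_range.mpr (by omega), ?_⟩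
    rw [pvSliceTwo cs i hi1]
    simp only [pvKey, List.cons.injEq, and_true] at h4
    refine (PySem.Chars.exists_prefix_drop_iff_isIn _ _).mp ⟨t - (i + 2), ?_⟩
    rw [List.drop_drop, show i + 2 + (t - (i + 2)) = t by omega]
    exact (pvPairPrefix cs _ _ t).mpr ⟨h3, h4.1.symm, h4.2.symm⟩

theorem pvB_pal_iff (cs : List Char) :
    ((List.range (cs.length - 2)).any (fun i => cs.getD i ' ' == cs.getD (i+2) ' ')) = true
      ↔ pvPalEx cs cs.length cs.length := by
  rw [List.any_eq_true]
  simp only [List.mem_range, beq_iff_eq]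
  constructor
  · rintro ⟨i, hi, he⟩; exact ⟨i, by omega, by omega, he⟩
  · rintro ⟨i, hi, h2, he⟩; exact ⟨i, by omega, he⟩

-- ===== VERDICT (by name: the statement is the Claim_ definition above) =====
theorem processLine2_spec : Claim_equal_processLine2 := by
  intro s _
  unfold Spec_processLine2 processLine2 processLine2_alt
  obtain ⟨b, p, d, hfold, hb, hp, -⟩ := pvInv s.toList s.toList.length s.toList.length
  simp only [hfold]
  have hite : (if (b && p : Bool) then true else false) = (b && p) := by
    cases (b && p) <;> simp
  rw [hite, Bool.eq_iff_iff]
  simp only [Bool.and_eq_true, hb, hp, pvB_two_iff, pvB_pal_iff]
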